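-- pv_equiv track=rewrite | github.com/realtimshady16/python-to-java | util.py | nest_lines
-- ===== SOURCE A (Python) =====
-- def find_indentation_level(line):
--     return len(line) - len(line.lstrip())
--
-- def nest_lines(lines, start=0, min_indent=0):
--     nested_lines = []
--     i = start
--     while i < len(lines):
--         current_indent = find_indentation_level(lines[i])
--         if current_indent > min_indent:
--             # Recursively process the nested block
--             nested_block, new_start = nest_lines(lines, i, current_indent)
--             #nested_lines.append(" " * current_indent)
--             nested_lines.append(nested_block)
--             nested_lines.append(" " * current_indent + "}")
--             i = new_start
--         elif current_indent == min_indent: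
--             nested_lines.append(lines[i])
--             i += 1
--         else:
--             # End of the current block
--             break
--
--     return "\n".join(nested_lines), i
-- ===== SOURCE B (Python) =====
-- def find_indentation_level(line):
--     return len(line) - len(line.lstrip())
--
-- def nest_lines(lines, start=0, min_indent=0):
--     # explicit stack of (indent_level, pieces) frames instead of recursion
--     stack = [(min_indent, [])]
--     i = start
--     n = len(lines)
--     while i < n:
--         line = lines[i]
--         ind = find_indentation_level(line)
--         lvl, pieces = stack[-1]
--         if ind > lvl:
--             stack.append((ind, [line]))
--             i += 1
--         elif ind == lvl:
--             pieces.append(line)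
--             i += 1
--         else:
--             if len(stack) == 1:
--                 break
--             stack.pop()
--             stack[-1][1].append("\n".join(pieces))
--             stack[-1][1].append(" " * lvl + "}")
--     while len(stack) > 1:
--         lvl, pieces = stack.pop()
--         stack[-1][1].append("\n".join(pieces))
--         stack[-1][1].append(" " * lvl + "}")
--     return "\n".join(stack[0][1]), i
-- ===== Notes on version B (the rewrite author's own statement) =====
-- stated objective: alternative
-- what changed: B replaces A's mutual recursion (a while-loop that calls nest_lines recursively for each deeper-indented block) by a single non-recursive loop over an explicit stack of (indent_level, pieces) frames that pushes a frame when indentation increases and pops/closes a frame with its '}' line when it decreases.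
import Mathlib
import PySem

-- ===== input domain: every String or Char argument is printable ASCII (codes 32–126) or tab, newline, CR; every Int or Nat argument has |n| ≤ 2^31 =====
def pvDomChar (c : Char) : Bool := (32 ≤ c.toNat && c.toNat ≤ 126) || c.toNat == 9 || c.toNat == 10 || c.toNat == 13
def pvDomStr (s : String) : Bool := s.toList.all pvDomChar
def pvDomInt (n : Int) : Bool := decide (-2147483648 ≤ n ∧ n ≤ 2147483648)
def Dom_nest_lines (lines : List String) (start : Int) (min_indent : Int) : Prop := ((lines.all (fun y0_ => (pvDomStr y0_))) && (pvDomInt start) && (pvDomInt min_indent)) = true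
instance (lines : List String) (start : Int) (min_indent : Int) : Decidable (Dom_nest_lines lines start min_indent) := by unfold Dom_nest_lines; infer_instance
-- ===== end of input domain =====

-- B replaces A's recursion by a single loop over an explicit stack of (indent, pieces) frames (objective: alternative decomposition, same cost).

-- ===== PORT A =====
-- helper shared by both Pythons: len(line) - len(line.lstrip())
def find_indentation_level (line : String) : Int :=
  PySem.Str.len line - PySem.Str.len (PySem.Str.lstrip line)

-- " " * n  (exact: Python returns "" for n ≤ 0)
def pySpaces (n : Int) : String := String.ofList (List.replicate n.toNat ' ')

-- bound used only by the termination measure of the port of A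
def pvMaxLen (lines : List String) : Int :=
  lines.foldl (fun m s => max m (PySem.Str.len s)) 0

theorem find_ind_le_maxLen {lines : List String} {line : String} (hmem : line ∈ lines) :
    find_indentation_level line ≤ pvMaxLen lines := by
  have h2 := (PySem.List.le_foldl_max_int lines (fun s => PySem.Str.len s) 0).2 line hmem
  have h0 : (0:Int) ≤ PySem.Str.len (PySem.Str.lstrip line) := by
    simp [PySem.Str.len_eq]
  unfold find_indentation_level pvMaxLen
  omega

-- small arithmetic facts cited by the termination proofs of the ports
theorem pvTn1 {len i : Int} (h : i < len) : (len - (i+1)).toNat < (len - i).toNat := by omega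
theorem pvTn2 {len i i₁ : Int} (h : i < len) (h1 : i + 1 ≤ i₁) :
    (len - i₁).toNat < (len - i).toNat := by omega
theorem pvTn3 {b mi ind : Int} (h1 : mi < ind) (h2 : ind ≤ b) :
    (b + 1 - ind).toNat < (b + 1 - mi).toNat := by omega
theorem pvLe1 {i j : Int} (h : i + 1 ≤ j) : i ≤ j := by omega
theorem pvTb1 {a b : Nat} (h : b < a) (s : Nat) : 2*b + (s+2) < 2*a + (s+1) := by omega
theorem pvTb2 {a b : Nat} (h : b < a) (s : Nat) : 2*b + s < 2*a + s := by omega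
theorem pvTb3 (t s : Nat) : 2*t + (s+1) < 2*t + (s+2) := by omega

theorem isSome_eq_some_getD {α : Type} {o : Option α} (h : o.isSome) (d : α) :
    o = some (o.getD d) := by cases o <;> simp at h ⊢

-- A's recursive worker; the subtype carries the invariants needed for termination
-- (it returns the list of pieces before the final "\n".join, plus the new index).
def nestA (lines : List String) (i mi : Int) (acc : List String) :
    {r : List String × Int // i ≤ r.2 ∧
      ((i < (lines.length : Int) ∧ ∃ line, PySem.List.pyGet? lines i = some line ∧
          mi ≤ find_indentation_level line) → i + 1 ≤ r.2)} :=
  if h : i < (lines.length : Int) then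
    if hn : (PySem.List.pyGet? lines i).isSome then
      let line := (PySem.List.pyGet? lines i).getD ""
      if hgt : mi < find_indentation_level line then
        -- nested_block, new_start = nest_lines(lines, i, current_indent)
        match nestA lines i (find_indentation_level line) [] with
        | ⟨(blk, i₁), hp⟩ =>
          let r₂ := nestA lines i₁ mi
            (acc ++ [PySem.Str.join "\n" blk,
                     pySpaces (find_indentation_level line) ++ "}"])
          ⟨r₂.1, by
            have h1 : i + 1 ≤ i₁ := hp.2 ⟨h, line, isSome_eq_some_getD hn "", le_refl _⟩
            have h2 := r₂.2.1
            exact ⟨pvLe1 (le_trans h1 h2), fun _ => le_trans h1 h2⟩⟩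
      else if heq : find_indentation_level line = mi then
        let r := nestA lines (i+1) mi (acc ++ [line])
        ⟨r.1, ⟨pvLe1 r.2.1, fun _ => r.2.1⟩⟩
      else
        ⟨(acc, i), le_refl _, fun hc => by
          obtain ⟨-, line', hg', hle⟩ := hc
          have he : line = line' := Option.some.inj ((isSome_eq_some_getD hn "").symm.trans hg')
          rw [← he] at hle
          exact absurd (le_antisymm (not_lt.mp hgt) hle) heq⟩
    else
      ⟨(acc, i), le_refl _, fun hc => by
        obtain ⟨-, line', hg', -⟩ := hc
        rw [hg'] at hn; simp at hn⟩
  else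
    ⟨(acc, i), le_refl _, fun hc => absurd hc.1 h⟩
termination_by ((lines.length - i).toNat, (pvMaxLen lines + 1 - mi).toNat)
decreasing_by
  all_goals first
    | (apply Prod.Lex.left; exact pvTn1 h)
    | (apply Prod.Lex.right
       exact pvTn3 hgt
         (find_ind_le_maxLen (PySem.List.mem_of_pyGet?_eq_some _ (isSome_eq_some_getD hn ""))))
    | (apply Prod.Lex.left
       exact pvTn2 h (hp.2 ⟨h, line, isSome_eq_some_getD hn "", le_refl _⟩))

def nest_lines (lines : List String) (start : Int) (min_indent : Int) : String × Int :=
  let r := nestA lines start min_indent []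
  (PySem.Str.join "\n" r.1.1, r.1.2)

-- ===== PORT B =====
-- close every remaining frame into the one below it (B's trailing while-loop)
def closeAll : List (Int × List String) → List String
  | [] => []
  | [(_, ps)] => ps
  | (lvl, ps) :: (plvl, pps) :: rest =>
      closeAll ((plvl, pps ++ [PySem.Str.join "\n" ps, pySpaces lvl ++ "}"]) :: rest)
termination_by s => s.length

-- B's main while-loop over the explicit frame stack
def bLoop (lines : List String) (i : Int) (stack : List (Int × List String)) :
    List String × Int :=
  if h : i < (lines.length : Int) then
    match PySem.List.pyGet? lines i with
    | some line =>
      match stack with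
      | [] => ([], i)          -- unreachable: the stack always holds the root frame
      | (lvl, ps) :: rest =>
        if lvl < find_indentation_level line then
          bLoop lines (i+1) ((find_indentation_level line, [line]) :: (lvl, ps) :: rest)
        else if find_indentation_level line = lvl then
          bLoop lines (i+1) ((lvl, ps ++ [line]) :: rest)
        else
          match rest with
          | [] => (ps, i)      -- only the root frame: break
          | (plvl, pps) :: rrest =>
              bLoop lines i
                ((plvl, pps ++ [PySem.Str.join "\n" ps, pySpaces lvl ++ "}"]) :: rrest)
    | none => ([], i)          -- unreachable under Pre_ (lines[i] would raise)
  else (closeAll stack, i)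
termination_by (2 * (lines.length - i).toNat + stack.length)
decreasing_by
  all_goals simp only [List.length_cons]
  · exact pvTb1 (pvTn1 h) _
  · exact pvTb2 (pvTn1 h) _
  · exact pvTb3 _ _

def nest_lines_alt (lines : List String) (start : Int) (min_indent : Int) : String × Int :=
  let r := bLoop lines start [(min_indent, [])]
  (PySem.Str.join "\n" r.1, r.2)

-- ===== PRECONDITION & SPEC =====
-- Pre_ excludes exactly the inputs on which Python A raises IndexError
-- (start < -len(lines): the first access lines[start] is out of range); B raises there too.
def Pre_nest_lines (lines : List String) (start : Int) (min_indent : Int) : Prop :=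
  -(lines.length : Int) ≤ start
instance (lines : List String) (start : Int) (min_indent : Int) : Decidable (Pre_nest_lines lines start min_indent) := by unfold Pre_nest_lines; infer_instance

def pvWitness_nest_lines : List String × Int × Int := (["a"], 0, 0)

def Spec_nest_lines (lines : List String) (start : Int) (min_indent : Int) (out : String × Int) : Prop := out = nest_lines_alt lines start min_indent
instance (lines : List String) (start : Int) (min_indent : Int) (out : String × Int) : Decidable (Spec_nest_lines lines start min_indent out) := by unfold Spec_nest_lines; infer_instance

-- ===== CLAIM (what is proved, stated in full; the proofs are below) =====
def Claim_equal_nest_lines : Prop := ∀ (lines : List String) (start : Int) (min_indent : Int), Dom_nest_lines lines start min_indent → Pre_nest_lines lines start min_indent → Spec_nest_lines lines start min_indent (nest_lines lines start min_indent)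

-- ===== LEMMAS AND PROOFS =====

-- unfolding lemmas for the two ports
theorem nestA_stop {lines : List String} {i mi : Int} {acc : List String}
    (h : ¬ i < (lines.length : Int)) : (nestA lines i mi acc).1 = (acc, i) := by
  conv_lhs => rw [nestA]
  simp [h]

theorem nestA_big {lines : List String} {i mi : Int} {acc : List String} {line : String}
    (h : i < (lines.length : Int)) (hg : PySem.List.pyGet? lines i = some line)
    (hgt : mi < find_indentation_level line) :
    (nestA lines i mi acc).1 =
      (nestA lines (nestA lines i (find_indentation_level line) []).1.2 mi
        (acc ++ [PySem.Str.join "\n" (nestA lines i (find_indentation_level line) []).1.1,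
                 pySpaces (find_indentation_level line) ++ "}"])).1 := by
  have hline : (PySem.List.pyGet? lines i).getD "" = line := by rw [hg]; rfl
  rcases hr : nestA lines i (find_indentation_level line) [] with ⟨⟨blk, i₁⟩, hp⟩
  conv_lhs => rw [nestA]
  simp [h, hg, hgt, hr]
  rw [hline, hr]

theorem nestA_eq {lines : List String} {i mi : Int} {acc : List String} {line : String}
    (h : i < (lines.length : Int)) (hg : PySem.List.pyGet? lines i = some line)
    (heq : find_indentation_level line = mi) :
    (nestA lines i mi acc).1 = (nestA lines (i+1) mi (acc ++ [line])).1 := by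
  conv_lhs => rw [nestA]
  simp [h, hg, heq, lt_irrefl]

theorem nestA_small {lines : List String} {i mi : Int} {acc : List String} {line : String}
    (h : i < (lines.length : Int)) (hg : PySem.List.pyGet? lines i = some line)
    (h1 : ¬ mi < find_indentation_level line) (h2 : find_indentation_level line ≠ mi) :
    (nestA lines i mi acc).1 = (acc, i) := by
  conv_lhs => rw [nestA]
  simp [h, hg, h1, h2]

theorem bLoop_stop {lines : List String} {i : Int} {stack : List (Int × List String)}
    (h : ¬ i < (lines.length : Int)) : bLoop lines i stack = (closeAll stack, i) := by
  rw [bLoop]; simp [h]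

theorem bLoop_push {lines : List String} {i : Int} {line : String} {lvl : Int}
    {ps : List String} {rest : List (Int × List String)}
    (h : i < (lines.length : Int)) (hg : PySem.List.pyGet? lines i = some line)
    (hgt : lvl < find_indentation_level line) :
    bLoop lines i ((lvl, ps) :: rest) =
      bLoop lines (i+1) ((find_indentation_level line, [line]) :: (lvl, ps) :: rest) := by
  conv_lhs => rw [bLoop]
  simp [h, hg, hgt]

theorem bLoop_app {lines : List String} {i : Int} {line : String} {lvl : Int}
    {ps : List String} {rest : List (Int × List String)}
    (h : i < (lines.length : Int)) (hg : PySem.List.pyGet? lines i = some line)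
    (heq : find_indentation_level line = lvl) :
    bLoop lines i ((lvl, ps) :: rest) = bLoop lines (i+1) ((lvl, ps ++ [line]) :: rest) := by
  conv_lhs => rw [bLoop]
  simp [h, hg, heq, lt_irrefl]

theorem bLoop_break {lines : List String} {i : Int} {line : String} {lvl : Int}
    {ps : List String}
    (h : i < (lines.length : Int)) (hg : PySem.List.pyGet? lines i = some line)
    (h1 : ¬ lvl < find_indentation_level line) (h2 : find_indentation_level line ≠ lvl) :
    bLoop lines i [(lvl, ps)] = (ps, i) := by
  conv_lhs => rw [bLoop]
  simp [h, hg, h1, h2]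

theorem bLoop_pop {lines : List String} {i : Int} {line : String} {lvl plvl : Int}
    {ps pps : List String} {rrest : List (Int × List String)}
    (h : i < (lines.length : Int)) (hg : PySem.List.pyGet? lines i = some line)
    (h1 : ¬ lvl < find_indentation_level line) (h2 : find_indentation_level line ≠ lvl) :
    bLoop lines i ((lvl, ps) :: (plvl, pps) :: rrest) =
      bLoop lines i ((plvl, pps ++ [PySem.Str.join "\n" ps, pySpaces lvl ++ "}"]) :: rrest) := by
  conv_lhs => rw [bLoop]
  simp [h, hg, h1, h2]

theorem pyGet?_some_of {lines : List String} {i : Int} (h1 : -(lines.length:Int) ≤ i)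
    (h2 : i < (lines.length : Int)) : ∃ line, PySem.List.pyGet? lines i = some line := by
  rcases hn : PySem.List.pyGet? lines i with _ | line
  · rw [PySem.List.pyGet?_eq_none_iff] at hn
    exact absurd (by constructor <;> omega) hn
  · exact ⟨line, rfl⟩

-- Simulation: running B's loop with frame (mi, ps) on top is: run A's worker from
-- (i, mi) with accumulator ps, then close the resulting block into the frame below.
theorem simAux : ∀ (n m : Nat), ∀ (lines : List String) (i mi : Int) (ps : List String)
    (rest : List (Int × List String)),
    ((lines.length : Int) - i).toNat = n → (pvMaxLen lines + 1 - mi).toNat = m →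
    -(lines.length : Int) ≤ i →
      bLoop lines i ((mi, ps) :: rest) =
        (match rest with
         | [] => (nestA lines i mi ps).1
         | (plvl, pps) :: rrest =>
             bLoop lines (nestA lines i mi ps).1.2
               ((plvl, pps ++ [PySem.Str.join "\n" (nestA lines i mi ps).1.1,
                               pySpaces mi ++ "}"]) :: rrest)) := by
  intro n
  induction n using Nat.strong_induction_on with
  | _ n ihn =>
  intro m
  induction m using Nat.strong_induction_on with
  | _ m ihm =>
  intro lines i mi ps rest hn hm hpre
  by_cases hlt : i < (lines.length : Int)
  · obtain ⟨line, hg⟩ := pyGet?_some_of hpre hlt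
    rcases lt_trichotomy mi (find_indentation_level line) with hgt | hmid | hsm
    · -- a deeper block starts: B pushes a frame, A recurses
      have hip : i + 1 ≤ (nestA lines i (find_indentation_level line) []).1.2 :=
        (nestA lines i (find_indentation_level line) []).2.2 ⟨hlt, line, hg, le_refl _⟩
      have hmem : find_indentation_level line ≤ pvMaxLen lines :=
        find_ind_le_maxLen (PySem.List.mem_of_pyGet?_eq_some _ hg)
      have step1 : bLoop lines i ((find_indentation_level line, []) :: (mi, ps) :: rest) =
          bLoop lines (i+1) ((find_indentation_level line, [line]) :: (mi, ps) :: rest) := by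
        simpa using bLoop_app hlt hg rfl
      have hdeep := ihm ((pvMaxLen lines + 1 - find_indentation_level line).toNat)
        (by omega) lines i (find_indentation_level line) [] ((mi, ps) :: rest) hn rfl hpre
      have hcont := ihn (((lines.length : Int) - (nestA lines i (find_indentation_level line) []).1.2).toNat)
        (by omega) ((pvMaxLen lines + 1 - mi).toNat) lines
        ((nestA lines i (find_indentation_level line) []).1.2) mi
        (ps ++ [PySem.Str.join "\n" (nestA lines i (find_indentation_level line) []).1.1,
                pySpaces (find_indentation_level line) ++ "}"]) rest rfl rfl (by omega)
      rw [bLoop_push hlt hg hgt, ← step1, hdeep]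
      simp only []
      rw [hcont, nestA_big hlt hg hgt]
    · -- the line belongs to the current block
      have hcont := ihn (((lines.length : Int) - (i+1)).toNat) (by omega)
        ((pvMaxLen lines + 1 - mi).toNat) lines (i+1) mi (ps ++ [line]) rest rfl rfl (by omega)
      rw [bLoop_app hlt hg hmid.symm, hcont, nestA_eq hlt hg hmid.symm]
    · -- the line closes the current block
      have h1 : ¬ mi < find_indentation_level line := by omega
      have h2 : find_indentation_level line ≠ mi := by omega
      rcases rest with _ | ⟨⟨plvl, pps⟩, rrest⟩
      · rw [bLoop_break hlt hg h1 h2, nestA_small hlt hg h1 h2]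
      · rw [bLoop_pop hlt hg h1 h2]
        simp only []
        rw [nestA_small hlt hg h1 h2]
  · -- end of input: close every open frame
    rcases rest with _ | ⟨⟨plvl, pps⟩, rrest⟩
    · rw [bLoop_stop hlt, nestA_stop hlt]
      simp [closeAll]
    · rw [bLoop_stop hlt]
      simp only []
      rw [nestA_stop hlt, bLoop_stop hlt]
      simp [closeAll]

theorem sim (lines : List String) (i mi : Int) (ps : List String)
    (rest : List (Int × List String)) (hpre : -(lines.length : Int) ≤ i) :
    bLoop lines i ((mi, ps) :: rest) =
      (match rest with
       | [] => (nestA lines i mi ps).1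
       | (plvl, pps) :: rrest =>
           bLoop lines (nestA lines i mi ps).1.2
             ((plvl, pps ++ [PySem.Str.join "\n" (nestA lines i mi ps).1.1,
                             pySpaces mi ++ "}"]) :: rrest)) :=
  simAux _ _ lines i mi ps rest rfl rfl hpre

-- ===== VERDICT (by name: the statement is the Claim_ definition above) =====
theorem nest_lines_spec : Claim_equal_nest_lines := by
  intro lines start min_indent _ hpre
  unfold Pre_nest_lines at hpre
  unfold Spec_nest_lines nest_lines nest_lines_alt
  rw [sim lines start min_indent [] [] hpre]
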